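-- pv_equiv track=rewrite | github.com/anhttdevbm/ai-agent-rekkieedu | cham_bai/workflow.py | _normalize_parallel_submissions_and_reports
-- ===== SOURCE A (Python) =====
-- def _normalize_parallel_submissions_and_reports(
--     submission_refs: list[str],
--     report_repos_text: str,
-- ) -> tuple[list[str], list[str], list[str]]:
--     """
--     Cùng số dòng sau khi pad; bỏ các cặp trống ở cuối.
--     Cho phép dòng i chỉ có repo báo cáo (bài nộp i trống).
--     """
--     sl = [(str(x) if x is not None else "").strip() for x in (submission_refs or [])]
--     rl = [(ln.rstrip("\r") or "").strip() for ln in (report_repos_text or "").splitlines()]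
--     n = max(len(sl), len(rl))
--     sl = sl + [""] * (n - len(sl))
--     rl = rl + [""] * (n - len(rl))
--     while n > 0 and not sl[n - 1] and not rl[n - 1]:
--         n -= 1
--     sl, rl = sl[:n], rl[:n]
--     return sl, rl, []
-- ===== SOURCE B (Python) =====
-- from itertools import zip_longest
--
--
-- def _normalize_parallel_submissions_and_reports(
--     submission_refs: list[str],
--     report_repos_text: str,
-- ) -> tuple[list[str], list[str], list[str]]:
--     sl = [(str(x) if x is not None else "").strip() for x in (submission_refs or [])]
--     rl = [(ln.rstrip("\r") or "").strip() for ln in (report_repos_text or "").splitlines()]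
--     # single forward pass: largest index where either side is truthy
--     last = -1
--     for i, (a, b) in enumerate(zip_longest(sl, rl, fillvalue="")):
--         if a or b:
--             last = i
--     n = last + 1
--     sl = (sl + [""] * (n - len(sl)))[:n]
--     rl = (rl + [""] * (n - len(rl)))[:n]
--     return sl, rl, []
-- ===== Notes on version B (the rewrite author's own statement) =====
-- stated objective: simpler
-- what changed: Replaces A's pad-both-to-max followed by a backward while-loop trimming trailing both-empty pairs with a single forward zip_longest pass that records the last index where either side is non-empty, then pads-or-slices both lists to that length.
import Mathlib
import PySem

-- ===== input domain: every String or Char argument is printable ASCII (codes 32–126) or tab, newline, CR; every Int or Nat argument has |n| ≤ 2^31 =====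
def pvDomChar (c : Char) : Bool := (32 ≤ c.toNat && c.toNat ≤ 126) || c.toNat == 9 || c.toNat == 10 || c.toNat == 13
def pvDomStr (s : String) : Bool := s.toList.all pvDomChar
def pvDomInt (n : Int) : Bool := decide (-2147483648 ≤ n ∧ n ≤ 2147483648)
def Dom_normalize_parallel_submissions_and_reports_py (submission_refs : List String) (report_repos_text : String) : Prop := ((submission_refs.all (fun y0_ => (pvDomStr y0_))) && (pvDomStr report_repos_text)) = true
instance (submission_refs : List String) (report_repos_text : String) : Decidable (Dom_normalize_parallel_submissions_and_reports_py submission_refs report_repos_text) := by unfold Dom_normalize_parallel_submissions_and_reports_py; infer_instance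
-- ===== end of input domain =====

-- B replaces A's pad-to-max + backward trailing-trim while-loop by one forward zip_longest pass that
-- records the last index where either side is non-empty, then pads/slices both lists to that length
-- (objective: simpler decomposition; same asymptotic cost).

-- ===== PORT A =====

-- hand port of Python's ln.rstrip("\r") (strip only '\r' chars from the right); exact on all strings
def pvRstripCR (s : String) : String :=
  String.mk ((s.toList.reverse.dropWhile (fun c => c == '\r')).reverse)

-- the backward while-loop `while n > 0 and not sl[n-1] and not rl[n-1]: n -= 1`;
-- at every call below the index n-1 is in range, so the `.getD ""` default is never used
def pvTrimLoop (sl rl : List String) : Nat → Nat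
  | 0 => 0
  | n + 1 =>
    if (PySem.List.pyGet? sl (n : Int)).getD "" = "" ∧ (PySem.List.pyGet? rl (n : Int)).getD "" = ""
    then pvTrimLoop sl rl n
    else n + 1

-- `x` is a str and never None, so `(str(x) if x is not None else "")` is `x`;
-- `(report_repos_text or "")` equals `report_repos_text` under splitlines; `(ln.rstrip("\r") or "")` = `ln.rstrip("\r")` up to falsiness of ""
def normalize_parallel_submissions_and_reports_py (submission_refs : List String) (report_repos_text : String) : List String × List String × List String :=
  let sl := submission_refs.map (fun x => PySem.Str.strip x)
  let rl := (PySem.Str.splitlines report_repos_text).map (fun ln => PySem.Str.strip (pvRstripCR ln))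
  let n := max sl.length rl.length
  let sl2 := sl ++ List.replicate (n - sl.length) ""
  let rl2 := rl ++ List.replicate (n - rl.length) ""
  let n2 := pvTrimLoop sl2 rl2 n
  (sl2.take n2, rl2.take n2, [])

-- ===== PORT B =====

-- itertools.zip_longest(sl, rl, fillvalue="")
def pvZipLongest : List String → List String → List (String × String)
  | [], [] => []
  | a :: s, [] => (a, "") :: pvZipLongest s []
  | [], b :: r => ("", b) :: pvZipLongest [] r
  | a :: s, b :: r => (a, b) :: pvZipLongest s r

-- (xs + [""] * (n - len(xs)))[:n]
def pvPadTo (xs : List String) (n : Nat) : List String :=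
  (xs ++ List.replicate (n - xs.length) "").take n

def normalize_parallel_submissions_and_reports_py_alt (submission_refs : List String) (report_repos_text : String) : List String × List String × List String :=
  let sl := submission_refs.map (fun x => PySem.Str.strip x)
  let rl := (PySem.Str.splitlines report_repos_text).map (fun ln => PySem.Str.strip (pvRstripCR ln))
  -- forward pass with enumerate: state = (last, i)
  let last := ((pvZipLongest sl rl).foldl
    (fun (st : Int × Nat) p => (if p.1 ≠ "" ∨ p.2 ≠ "" then (st.2 : Int) else st.1, st.2 + 1))
    (-1, 0)).1
  let n := (last + 1).toNat
  (pvPadTo sl n, pvPadTo rl n, [])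

-- ===== PRECONDITION & SPEC =====
def Spec_normalize_parallel_submissions_and_reports_py (submission_refs : List String) (report_repos_text : String) (out : List String × List String × List String) : Prop := out = normalize_parallel_submissions_and_reports_py_alt submission_refs report_repos_text
instance (submission_refs : List String) (report_repos_text : String) (out : List String × List String × List String) : Decidable (Spec_normalize_parallel_submissions_and_reports_py submission_refs report_repos_text out) := by unfold Spec_normalize_parallel_submissions_and_reports_py; infer_instance

-- ===== CLAIM (what is proved, stated in full; the proofs are below) =====
def Claim_equal_normalize_parallel_submissions_and_reports_py : Prop := ∀ (submission_refs : List String) (report_repos_text : String), Dom_normalize_parallel_submissions_and_reports_py submission_refs report_repos_text → Spec_normalize_parallel_submissions_and_reports_py submission_refs report_repos_text (normalize_parallel_submissions_and_reports_py submission_refs report_repos_text)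

-- ===== LEMMAS AND PROOFS =====

-- canonical "kept length": position after the last pair with a non-empty component, read from the right
def pvLastRev : List (String × String) → Nat
  | [] => 0
  | p :: t => if p.1 = "" ∧ p.2 = "" then pvLastRev t else t.length + 1

def pvC (L : List (String × String)) : Nat := pvLastRev L.reverse

theorem pvC_concat (L : List (String × String)) (p : String × String) :
    pvC (L ++ [p]) = if p.1 = "" ∧ p.2 = "" then pvC L else L.length + 1 := by
  simp [pvC, pvLastRev]

theorem pvLastRev_le (L : List (String × String)) : pvLastRev L ≤ L.length := by
  cases L with
  | nil => simp [pvLastRev]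
  | cons p t =>
    simp only [pvLastRev]
    split
    · exact le_trans (pvLastRev_le t) (by simp)
    · simp

theorem pvC_le (L : List (String × String)) : pvC L ≤ L.length := by
  simpa [pvC] using pvLastRev_le L.reverse

-- the while-loop never looks at indices ≥ n
theorem pvTrimLoop_append (sl rl X Y : List String) (n : Nat)
    (hs : n ≤ sl.length) (hr : n ≤ rl.length) :
    pvTrimLoop (sl ++ X) (rl ++ Y) n = pvTrimLoop sl rl n := by
  induction n with
  | zero => rfl
  | succ m ih =>
    simp only [pvTrimLoop, PySem.List.pyGet?_natCast,
      List.getElem?_append_left (Nat.lt_of_succ_le hs),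
      List.getElem?_append_left (Nat.lt_of_succ_le hr)]
    rw [ih (Nat.le_of_succ_le hs) (Nat.le_of_succ_le hr)]

-- the while-loop computes pvC of the zipped list
theorem pvTrimLoop_eq_pvC (L : List (String × String)) :
    pvTrimLoop (L.map Prod.fst) (L.map Prod.snd) L.length = pvC L := by
  induction L using List.reverseRecOn with
  | nil => rfl
  | append_singleton L p ih =>
    simp only [List.map_append, List.map_cons, List.map_nil, List.length_append,
      List.length_singleton, pvTrimLoop, PySem.List.pyGet?_natCast]
    rw [List.getElem?_append_right (by simp), List.getElem?_append_right (by simp)]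
    simp only [List.length_map, Nat.sub_self, List.getElem?_cons_zero, Option.getD_some]
    rw [pvC_concat]
    split
    · rw [pvTrimLoop_append (L.map Prod.fst) (L.map Prod.snd) [p.1] [p.2] L.length
        (by simp) (by simp), ih]
    · rfl

-- the forward pass computes pvC - 1 of the zipped list (with -1 encoding "no truthy row")
theorem pvFold_eq (L : List (String × String)) :
    L.foldl (fun (st : Int × Nat) p => (if p.1 ≠ "" ∨ p.2 ≠ "" then (st.2 : Int) else st.1, st.2 + 1))
      (-1, 0) = ((pvC L : Int) - 1, L.length) := by
  induction L using List.reverseRecOn with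
  | nil => rfl
  | append_singleton L p ih =>
    rw [List.foldl_append, ih]
    simp only [List.foldl_cons, List.foldl_nil, pvC_concat, List.length_append,
      List.length_singleton]
    by_cases h1 : p.1 = "" <;> by_cases h2 : p.2 = "" <;> simp [h1, h2]

-- zip_longest = zip of both lists padded to the max length
theorem pvZipLongest_nil_left (r : List String) :
    pvZipLongest [] r = (List.replicate r.length "").zip r := by
  induction r with
  | nil => simp [pvZipLongest]
  | cons b t ih => simp [pvZipLongest, List.replicate_succ, ih]

theorem pvZipLongest_eq_zip (sl rl : List String) :
    pvZipLongest sl rl =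
      (sl ++ List.replicate (max sl.length rl.length - sl.length) "").zip
      (rl ++ List.replicate (max sl.length rl.length - rl.length) "") := by
  induction sl generalizing rl with
  | nil =>
    cases rl with
    | nil => simp [pvZipLongest]
    | cons b t =>
      rw [pvZipLongest_nil_left]
      simp
  | cons a s ih =>
    cases rl with
    | nil =>
      simp only [pvZipLongest, ih []]
      simp [List.replicate_succ]
    | cons b t =>
      simp only [pvZipLongest, ih t]
      have h1 : max (a :: s).length (b :: t).length - (a :: s).length
          = max s.length t.length - s.length := by simp only [List.length_cons]; omega
      have h2 : max (a :: s).length (b :: t).length - (b :: t).length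
          = max s.length t.length - t.length := by simp only [List.length_cons]; omega
      rw [h1, h2]
      rfl

-- pad-or-slice to n equals take n of the max-padded list, for n ≤ m
theorem pvPadTo_eq_take (xs : List String) (n m : Nat) (hn : n ≤ m) :
    pvPadTo xs n = (xs ++ List.replicate (m - xs.length) "").take n := by
  unfold pvPadTo
  rw [List.take_append, List.take_append, List.take_replicate, List.take_replicate]
  congr 1
  congr 1
  omega

-- the two port bodies, zeta-reduced
theorem pvKey (sl rl : List String) :
    ((sl ++ List.replicate (max sl.length rl.length - sl.length) "").take
        (pvTrimLoop (sl ++ List.replicate (max sl.length rl.length - sl.length) "")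
          (rl ++ List.replicate (max sl.length rl.length - rl.length) "")
          (max sl.length rl.length)),
     (rl ++ List.replicate (max sl.length rl.length - rl.length) "").take
        (pvTrimLoop (sl ++ List.replicate (max sl.length rl.length - sl.length) "")
          (rl ++ List.replicate (max sl.length rl.length - rl.length) "")
          (max sl.length rl.length)),
     ([] : List String)) =
    (pvPadTo sl ((((pvZipLongest sl rl).foldl
        (fun (st : Int × Nat) p => (if p.1 ≠ "" ∨ p.2 ≠ "" then (st.2 : Int) else st.1, st.2 + 1))
        (-1, 0)).1 + 1).toNat),
     pvPadTo rl ((((pvZipLongest sl rl).foldl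
        (fun (st : Int × Nat) p => (if p.1 ≠ "" ∨ p.2 ≠ "" then (st.2 : Int) else st.1, st.2 + 1))
        (-1, 0)).1 + 1).toNat),
     ([] : List String)) := by
  set m := max sl.length rl.length with hm
  set SL := sl ++ List.replicate (m - sl.length) "" with hSL
  set RL := rl ++ List.replicate (m - rl.length) "" with hRL
  have hSLlen : SL.length = m := by
    simp only [hSL, List.length_append, List.length_replicate]; omega
  have hRLlen : RL.length = m := by
    simp only [hRL, List.length_append, List.length_replicate]; omega
  set L := SL.zip RL with hL
  have hlen : SL.length = RL.length := hSLlen.trans hRLlen.symm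
  have hfst : L.map Prod.fst = SL := List.map_fst_zip (le_of_eq hlen)
  have hsnd : L.map Prod.snd = RL := List.map_snd_zip (le_of_eq hlen.symm)
  have hLlen : L.length = m := by rw [hL, List.length_zip, hSLlen, hRLlen]; omega
  have hA : pvTrimLoop SL RL m = pvC L := by
    calc pvTrimLoop SL RL m = pvTrimLoop (L.map Prod.fst) (L.map Prod.snd) L.length := by
          rw [hfst, hsnd, hLlen]
      _ = pvC L := pvTrimLoop_eq_pvC L
  have hB : ((((pvZipLongest sl rl).foldl
      (fun (st : Int × Nat) p => (if p.1 ≠ "" ∨ p.2 ≠ "" then (st.2 : Int) else st.1, st.2 + 1))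
      (-1, 0)).1 + 1).toNat) = pvC L := by
    rw [pvZipLongest_eq_zip, ← hm, ← hSL, ← hRL, ← hL, pvFold_eq]
    simp
  have hle : pvC L ≤ m := hLlen ▸ pvC_le L
  rw [hA, hB]
  exact Prod.ext (pvPadTo_eq_take sl (pvC L) m hle).symm
    (Prod.ext (pvPadTo_eq_take rl (pvC L) m hle).symm rfl)

-- ===== VERDICT (by name: the statement is the Claim_ definition above) =====
theorem normalize_parallel_submissions_and_reports_py_spec : Claim_equal_normalize_parallel_submissions_and_reports_py := by
  intro submission_refs report_repos_text _
  unfold Spec_normalize_parallel_submissions_and_reports_py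
    normalize_parallel_submissions_and_reports_py normalize_parallel_submissions_and_reports_py_alt
  exact pvKey _ _
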